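-- pv_equiv track=rewrite | github.com/ncalavera/improv_ucb | scripts/extract.py | _drop_spurious_blank_lines
-- ===== SOURCE A (Python) =====
-- from typing import Dict, Iterable, List, Optional, Tuple
--
-- def _drop_spurious_blank_lines(lines: List[str]) -> List[str]:
--     compact: List[str] = []
--     for idx, line in enumerate(lines):
--         if line.strip():
--             compact.append(line)
--             continue
--
--         prev = _find_neighbor(lines, idx, direction=-1)
--         nxt = _find_neighbor(lines, idx, direction=1)
--         if (
--             prev
--             and nxt
--             and not prev.strip().startswith(("#", "-", "###"))
--             and not nxt.strip().startswith(("#", "-"))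
--             and nxt.strip()
--             and nxt.strip()[0].islower()
--         ):
--             continue
--
--         compact.append("")
--     return compact
--
-- def _find_neighbor(lines: List[str], start: int, direction: int) -> Optional[str]:
--     idx = start + direction
--     while 0 <= idx < len(lines):
--         candidate = lines[idx]
--         if candidate.strip():
--             return candidate
--         idx += direction
--     return None
-- ===== SOURCE B (Python) =====
-- def _drop_spurious_blank_lines(lines):
--     n = len(lines)
--     nxt = [None] * n
--     upcoming = None
--     for i in range(n - 1, -1, -1):
--         nxt[i] = upcoming
--         if lines[i].strip():
--             upcoming = lines[i]
--     out = []
--     prev = None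
--     for line, nb in zip(lines, nxt):
--         if line.strip():
--             out.append(line)
--             prev = line
--         elif prev is None or nb is None or _keeps_blank(prev, nb):
--             out.append("")
--     return out
--
--
-- def _keeps_blank(prev, nb):
--     p = prev.strip()[:1]
--     q = nb.strip()[:1]
--     return p in ("#", "-") or q in ("#", "-") or not q.islower()
-- ===== Notes on version B (the rewrite author's own statement) =====
-- stated objective: alternative
-- what changed: Instead of re-scanning the list from each blank line to find its nearest non-blank neighbors (_find_neighbor in both directions), B precomputes each line's next non-blank neighbor in one backward pass and carries the previous non-blank line during a single forward emitting pass; this removes the inner scans (quadratic on blank-heavy input) but is not measurably faster on typical blank-sparse input.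
import Mathlib
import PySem

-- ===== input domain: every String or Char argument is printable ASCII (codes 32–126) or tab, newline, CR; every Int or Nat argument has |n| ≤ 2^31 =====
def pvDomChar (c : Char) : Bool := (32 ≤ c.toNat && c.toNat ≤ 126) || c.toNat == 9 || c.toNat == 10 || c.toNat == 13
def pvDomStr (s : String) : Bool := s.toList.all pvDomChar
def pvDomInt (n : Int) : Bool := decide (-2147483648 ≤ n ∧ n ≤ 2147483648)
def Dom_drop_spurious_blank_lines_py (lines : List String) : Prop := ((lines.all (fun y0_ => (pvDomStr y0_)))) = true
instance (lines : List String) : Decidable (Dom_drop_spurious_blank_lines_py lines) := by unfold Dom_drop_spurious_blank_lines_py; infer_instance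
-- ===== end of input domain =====

-- B replaces A's per-blank-line neighbor rescans by one backward pass (next non-blank neighbor)
-- and one forward pass (carrying the previous non-blank line): objective "alternative".


-- Python truthiness of `line.strip()` (the test both sources make)
def pvTruthyStrip (s : String) : Bool := !(PySem.Str.strip s).toList.isEmpty

-- ===== PORT A =====
-- the while loop of _find_neighbor; fuel `lines.length + 1` bounds its iteration count (idx moves
-- one step per iteration, monotonically, and leaves the index range after at most that many steps)
def findNeighborLoop (lines : List String) (direction : Int) : Nat → Int → Option String
  | 0, _ => none
  | fuel + 1, idx =>
    if 0 ≤ idx ∧ idx < (lines.length : Int) then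
      match PySem.List.pyGet? lines idx with
      | some candidate =>
        if pvTruthyStrip candidate then some candidate
        else findNeighborLoop lines direction fuel (idx + direction)
      | none => none
    else none

def findNeighbor (lines : List String) (start direction : Int) : Option String :=
  findNeighborLoop lines direction (lines.length + 1) (start + direction)

-- A's inline `if prev and nxt and ... and nxt.strip()[0].islower():` condition, verbatim
def aCond (prev nxt : Option String) : Bool :=
  match prev, nxt with
  | some p, some q =>
    !p.toList.isEmpty && !q.toList.isEmpty &&
    !(PySem.Str.startswith (PySem.Str.strip p) "#" ||
      PySem.Str.startswith (PySem.Str.strip p) "-" ||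
      PySem.Str.startswith (PySem.Str.strip p) "###") &&
    !(PySem.Str.startswith (PySem.Str.strip q) "#" ||
      PySem.Str.startswith (PySem.Str.strip q) "-") &&
    !(PySem.Str.strip q).toList.isEmpty &&
    (match (PySem.Str.strip q).toList with
     | c :: _ => PySem.Chars.islower c
     | [] => false)
  | _, _ => false

def drop_spurious_blank_lines_py (lines : List String) : List String :=
  (PySem.List.enumerate lines).foldl
    (fun compact p =>
      if pvTruthyStrip p.2 then compact ++ [p.2]
      else if aCond (findNeighbor lines p.1 (-1)) (findNeighbor lines p.1 1) then compact
      else compact ++ [""]) []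

-- ===== PORT B =====
-- _keeps_blank of Source B
def keepsBlank (prev nb : String) : Bool :=
  let p := PySem.List.slice (PySem.Str.strip prev).toList none (some 1)
  let q := PySem.List.slice (PySem.Str.strip nb).toList none (some 1)
  (p = ['#'] || p = ['-']) || (q = ['#'] || q = ['-']) ||
  !(match q with
    | [c] => PySem.Chars.islower c
    | _ => false)

-- backward pass of Source B: returns (the nxt array, the running `upcoming`)
def nxtPass (lines : List String) : List (Option String) × Option String :=
  lines.foldr
    (fun line st => (st.2 :: st.1, if pvTruthyStrip line then some line else st.2))
    ([], none)

-- `prev is None or nb is None or _keeps_blank(prev, nb)`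
def bKeeps (prev nb : Option String) : Bool :=
  match prev, nb with
  | some pr, some q => keepsBlank pr q
  | _, _ => true

def drop_spurious_blank_lines_py_alt (lines : List String) : List String :=
  ((lines.zip (nxtPass lines).1).foldl
    (fun st p =>
      if pvTruthyStrip p.1 then (st.1 ++ [p.1], some p.1)
      else if bKeeps st.2 p.2 then (st.1 ++ [""], st.2)
      else st)
    (([] : List String), (none : Option String))).1

-- ===== PRECONDITION & SPEC =====
def Spec_drop_spurious_blank_lines_py (lines : List String) (out : List String) : Prop := out = drop_spurious_blank_lines_py_alt lines
instance (lines : List String) (out : List String) : Decidable (Spec_drop_spurious_blank_lines_py lines out) := by unfold Spec_drop_spurious_blank_lines_py; infer_instance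

-- ===== CLAIM (what is proved, stated in full; the proofs are below) =====
def Claim_equal_drop_spurious_blank_lines_py : Prop := ∀ (lines : List String), Dom_drop_spurious_blank_lines_py lines → Spec_drop_spurious_blank_lines_py lines (drop_spurious_blank_lines_py lines)

-- ===== LEMMAS AND PROOFS =====

-- common reference recursion: prev carried on the left, the next non-blank found in the suffix
def refRun : Option String → List String → List String
  | _, [] => []
  | prev, x :: xs =>
    if pvTruthyStrip x then x :: refRun (some x) xs
    else if bKeeps prev (xs.find? pvTruthyStrip) then "" :: refRun prev xs
    else refRun prev xs

theorem loop_right (lines : List String) : ∀ (fuel j : Nat), lines.length ≤ fuel + j →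
    findNeighborLoop lines 1 fuel (j : Int) = (lines.drop j).find? pvTruthyStrip := by
  intro fuel
  induction fuel with
  | zero =>
    intro j h
    rw [List.drop_eq_nil_of_le (by omega)]
    rfl
  | succ fuel ih =>
    intro j h
    by_cases hj : j < lines.length
    · have hget : PySem.List.pyGet? lines (j : Int) = some lines[j] := by
        rw [PySem.List.pyGet?_natCast]
        simp [hj]
      have hdrop : lines.drop j = lines[j] :: lines.drop (j + 1) :=
        (List.getElem_cons_drop hj).symm
      unfold findNeighborLoop
      rw [if_pos ⟨Int.natCast_nonneg j, by exact_mod_cast hj⟩, hget]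
      by_cases ht : pvTruthyStrip lines[j]
      · rw [hdrop, List.find?_cons_of_pos (p := pvTruthyStrip) ht]
        simp [ht]
      · have hc : ((j : Int) + 1) = ((j + 1 : Nat) : Int) := by push_cast; ring
        rw [hdrop, List.find?_cons_of_neg (p := pvTruthyStrip) (by simp [ht]), ← ih (j + 1) (by omega), ← hc]
        simp [ht]
    · have hcond : ¬ ((0 : Int) ≤ (j : Int) ∧ (j : Int) < (lines.length : Int)) := by
        rintro ⟨-, h2⟩; exact hj (by exact_mod_cast h2)
      rw [List.drop_eq_nil_of_le (by omega)]
      unfold findNeighborLoop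
      rw [if_neg hcond]
      rfl

theorem loop_left (lines : List String) : ∀ (fuel k : Nat), k ≤ lines.length → k ≤ fuel →
    findNeighborLoop lines (-1) fuel ((k : Int) - 1) = ((lines.take k).reverse).find? pvTruthyStrip := by
  intro fuel
  induction fuel with
  | zero =>
    intro k hk hf
    have : k = 0 := by omega
    subst this
    rfl
  | succ fuel ih =>
    intro k hk hf
    match k with
    | 0 => rfl
    | k + 1 =>
      have hk' : k < lines.length := by omega
      have hidx : ((k + 1 : Nat) : Int) - 1 = (k : Int) := by push_cast; ring
      have hget : PySem.List.pyGet? lines (k : Int) = some lines[k] := by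
        rw [PySem.List.pyGet?_natCast]
        simp [hk']
      have htake : (lines.take (k + 1)).reverse = lines[k] :: (lines.take k).reverse := by
        rw [List.take_add_one]
        simp [List.getElem?_eq_getElem hk']
      rw [hidx]
      unfold findNeighborLoop
      rw [if_pos ⟨Int.natCast_nonneg k, by exact_mod_cast hk'⟩, hget]
      by_cases ht : pvTruthyStrip lines[k]
      · rw [htake, List.find?_cons_of_pos (p := pvTruthyStrip) ht]
        simp [ht]
      · rw [htake, List.find?_cons_of_neg (p := pvTruthyStrip) (by simp [ht]),
          ← ih k (by omega) (by omega)]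
        simp [ht]
        rfl

theorem nxtPass_snd (xs : List String) : (nxtPass xs).2 = xs.find? pvTruthyStrip := by
  induction xs with
  | nil => rfl
  | cons x xs ih =>
    by_cases h : pvTruthyStrip x
    · rw [List.find?_cons_of_pos (p := pvTruthyStrip) h]
      simp [nxtPass, List.foldr_cons, h]
    · rw [List.find?_cons_of_neg (p := pvTruthyStrip) (by simp [h]), ← ih]
      simp [nxtPass, List.foldr_cons, h]

theorem nxtPass_cons (x : String) (xs : List String) :
    (nxtPass (x :: xs)).1 = xs.find? pvTruthyStrip :: (nxtPass xs).1 := by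
  rw [← nxtPass_snd]
  rfl

theorem b_fold (xs : List String) : ∀ (out : List String) (prev : Option String),
    ((xs.zip (nxtPass xs).1).foldl
      (fun st p =>
        if pvTruthyStrip p.1 then (st.1 ++ [p.1], some p.1)
        else if bKeeps st.2 p.2 then (st.1 ++ [""], st.2)
        else st)
      (out, prev)).1 = out ++ refRun prev xs := by
  induction xs with
  | nil => intro out prev; simp [refRun, nxtPass]
  | cons x xs ih =>
    intro out prev
    rw [nxtPass_cons]
    simp only [List.zip_cons_cons, List.foldl_cons]
    by_cases h : pvTruthyStrip x
    · simp [h, refRun, ih]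
    · by_cases hk : bKeeps prev (xs.find? pvTruthyStrip)
      · simp [h, hk, refRun, ih]
      · simp [h, hk, refRun, ih]

theorem truthy_ne_nil {s : String} (h : pvTruthyStrip s = true) : s.toList.isEmpty = false := by
  cases hs : s.toList with
  | nil =>
    exfalso
    have : (PySem.Str.strip s).toList = [] := by
      rw [PySem.Str.toList_strip, hs]
      rfl
    simp [pvTruthyStrip, this] at h
  | cons c t => simp

theorem slice_one_cons (c : Char) (t : List Char) :
    PySem.List.slice (c :: t) none (some 1) = [c] := by
  rfl

theorem startswith_single (c : Char) (t : List Char) (d : Char) :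
    PySem.Chars.startswith (c :: t) [d] = (c == d) := by
  by_cases h : c = d
  · subst h
    simp [PySem.Chars.startswith_iff, List.cons_prefix_cons]
  · have : ¬ PySem.Chars.startswith (c :: t) [d] = true := fun hc =>
      h (List.cons_prefix_cons.mp ((PySem.Chars.startswith_iff ..).mp hc)).1.symm
    simp only [Bool.not_eq_true] at this
    rw [this]
    exact beq_eq_false_iff_ne.mpr h |>.symm

theorem startswith_hhh (c : Char) (t : List Char) (h1 : ¬ c = '#') :
    PySem.Chars.startswith (c :: t) ['#', '#', '#'] = false := by
  rw [Bool.eq_false_iff]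
  intro hc
  exact h1 (List.cons_prefix_cons.mp ((PySem.Chars.startswith_iff ..).mp hc)).1.symm

theorem cond_equiv (p q : Option String)
    (hp : ∀ s, p = some s → pvTruthyStrip s = true)
    (hq : ∀ s, q = some s → pvTruthyStrip s = true) :
    aCond p q = !bKeeps p q := by
  match p, q with
  | none, none => rfl
  | none, some _ => rfl
  | some pr, none => rfl
  | some pr, some nb =>
    have hpr := hp pr rfl
    have hnb := hq nb rfl
    have hpr' : ((PySem.Str.strip pr).toList.isEmpty) = false := by
      simpa [pvTruthyStrip] using hpr
    have hnb' : ((PySem.Str.strip nb).toList.isEmpty) = false := by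
      simpa [pvTruthyStrip] using hnb
    obtain ⟨cp, tp, hcp⟩ : ∃ c t, (PySem.Str.strip pr).toList = c :: t := by
      cases h : (PySem.Str.strip pr).toList with
      | nil => rw [h] at hpr'; simp at hpr'
      | cons c t => exact ⟨c, t, rfl⟩
    obtain ⟨cq, tq, hcq⟩ : ∃ c t, (PySem.Str.strip nb).toList = c :: t := by
      cases h : (PySem.Str.strip nb).toList with
      | nil => rw [h] at hnb'; simp at hnb'
      | cons c t => exact ⟨c, t, rfl⟩
    have hprs : pr.toList.isEmpty = false := truthy_ne_nil hpr
    have hnbs : nb.toList.isEmpty = false := truthy_ne_nil hnb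
    simp only [aCond, bKeeps, keepsBlank, PySem.Str.startswith_eq, hcp, hcq,
      slice_one_cons, hprs, hnbs]
    have e1 : ("#" : String).toList = ['#'] := rfl
    have e2 : ("-" : String).toList = ['-'] := rfl
    have e3 : ("###" : String).toList = ['#', '#', '#'] := rfl
    rw [e1, e2, e3]
    rw [startswith_single, startswith_single, startswith_single, startswith_single]
    by_cases h1 : cp = '#'
    · subst h1; simp
    · rw [startswith_hhh cp tp h1]
      by_cases h2 : cp = '-' <;> by_cases h4 : cq = '#' <;> by_cases h5 : cq = '-' <;>
        simp_all

theorem findNeighbor_right (lines : List String) (i : Nat) :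
    findNeighbor lines (i : Int) 1 = (lines.drop (i + 1)).find? pvTruthyStrip := by
  unfold findNeighbor
  have hc : (i : Int) + 1 = ((i + 1 : Nat) : Int) := by push_cast; ring
  rw [hc, loop_right lines (lines.length + 1) (i + 1) (by omega)]

theorem findNeighbor_left (lines : List String) (i : Nat) (hi : i ≤ lines.length) :
    findNeighbor lines (i : Int) (-1) = ((lines.take i).reverse).find? pvTruthyStrip := by
  unfold findNeighbor
  have hc : (i : Int) + (-1) = (i : Int) - 1 := by ring
  rw [hc, loop_left lines (lines.length + 1) i hi (by omega)]

theorem a_fold (lines : List String) : ∀ (d : List String) (i : Nat) (acc : List String),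
    lines.drop i = d →
    ((PySem.List.enumerate d (i : Int)).foldl
      (fun compact p =>
        if pvTruthyStrip p.2 then compact ++ [p.2]
        else if aCond (findNeighbor lines p.1 (-1)) (findNeighbor lines p.1 1) then compact
        else compact ++ [""]) acc)
    = acc ++ refRun (((lines.take i).reverse).find? pvTruthyStrip) d := by
  intro d
  induction d with
  | nil => intro i acc _; simp [PySem.List.enumerate, refRun]
  | cons x rest ih =>
    intro i acc hd
    have hi : i < lines.length := by
      by_contra h
      rw [List.drop_eq_nil_of_le (by omega)] at hd
      exact List.cons_ne_nil x rest hd.symm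
    have hxr : lines[i] :: lines.drop (i + 1) = x :: rest := by
      rw [List.getElem_cons_drop]
      exact hd
    have hx : lines[i] = x := (List.cons.injEq .. ▸ hxr :)|>.1
    have hrest : lines.drop (i + 1) = rest := (List.cons.injEq .. ▸ hxr :)|>.2
    have hcast : ((i : Int) + 1) = ((i + 1 : Nat) : Int) := by push_cast; ring
    have htake1 : lines.take (i + 1) = lines.take i ++ [x] := by
      rw [List.take_add_one]
      simp [List.getElem?_eq_getElem hi, hx]
    rw [PySem.List.enumerate_cons, List.foldl_cons]
    by_cases ht : pvTruthyStrip x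
    · rw [if_pos ht]
      rw [hcast, ih (i + 1) (acc ++ [x]) hrest]
      rw [refRun]
      simp only [ht, if_true, htake1]
      simp [List.find?_cons_of_pos (p := pvTruthyStrip) ht]
    · have hprev := findNeighbor_left lines i (le_of_lt hi)
      have hnext := findNeighbor_right lines i
      rw [hrest] at hnext
      have hcond := cond_equiv (findNeighbor lines (i : Int) (-1)) (findNeighbor lines (i : Int) 1)
        (by intro s hs; rw [hprev] at hs; exact List.find?_some hs)
        (by intro s hs; rw [hnext] at hs; exact List.find?_some hs)
      rw [hprev, hnext] at hcond
      have hnx : ¬ pvTruthyStrip x = true := ht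
      have hfind1 : ((lines.take (i + 1)).reverse).find? pvTruthyStrip
          = ((lines.take i).reverse).find? pvTruthyStrip := by
        have hrev : (lines.take (i + 1)).reverse = x :: (lines.take i).reverse := by
          rw [htake1]; simp
        rw [hrev, List.find?_cons_of_neg (p := pvTruthyStrip) hnx]
      by_cases hk : bKeeps (((lines.take i).reverse).find? pvTruthyStrip)
          (rest.find? pvTruthyStrip)
      · have hac : aCond (findNeighbor lines (i : Int) (-1)) (findNeighbor lines (i : Int) 1) = false := by
          rw [hprev, hnext, hcond, hk]; rfl
        rw [if_neg ht, if_neg (by rw [hac]; simp)]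
        rw [hcast, ih (i + 1) (acc ++ [""]) hrest, hfind1]
        rw [refRun]
        simp [ht, hk]
      · have hac : aCond (findNeighbor lines (i : Int) (-1)) (findNeighbor lines (i : Int) 1) = true := by
          rw [hprev, hnext, hcond]
          simp [hk]
        rw [if_neg ht, if_pos hac]
        rw [hcast, ih (i + 1) acc hrest, hfind1]
        rw [refRun]
        simp [ht, hk]

theorem a_eq_refRun (lines : List String) :
    drop_spurious_blank_lines_py lines = refRun none lines := by
  unfold drop_spurious_blank_lines_py
  have h := a_fold lines lines 0 [] (by simp)
  simpa using h

theorem alt_eq_refRun (lines : List String) :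
    drop_spurious_blank_lines_py_alt lines = refRun none lines := by
  unfold drop_spurious_blank_lines_py_alt
  simpa using b_fold lines [] none

-- ===== VERDICT (by name: the statement is the Claim_ definition above) =====
theorem drop_spurious_blank_lines_py_spec : Claim_equal_drop_spurious_blank_lines_py := by
  intro lines _
  unfold Spec_drop_spurious_blank_lines_py
  rw [a_eq_refRun, alt_eq_refRun]
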